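-- pv_equiv track=rewrite | github.com/anthony-eluecque/blokus-game | src/utils/config_utils.py | validConfig
-- ===== SOURCE A (Python) =====
-- def validConfig(config: list) -> bool:
--     # { "nom": "", "couleur": "", "diff": estIa and "" or "joueur" }
--
--     CHECKIF_PLAYERS = ["Rouge","Bleu","Vert","Jaune"]
--
--     temp = []
--     for player in config:
--         temp.append(player["couleur"])
--         if player["couleur"] not in CHECKIF_PLAYERS:
--             return False
--     if len(set(temp)) != len(temp):
--         return False
--     return True
-- ===== SOURCE B (Python) =====
-- def validConfig(config: list) -> bool:
--     allowed = ("Rouge", "Bleu", "Vert", "Jaune")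
--     for i, player in enumerate(config):
--         c = player["couleur"]
--         if c not in allowed:
--             return False
--         for j in range(i):
--             if config[j]["couleur"] == c:
--                 return False
--     return True
-- ===== Notes on version B (the rewrite author's own statement) =====
-- stated objective: alternative
-- what changed: B removes the set machinery entirely: an index-based nested scan compares each player's colour against every earlier player's colour and rejects on the first bad or duplicated colour, instead of A's collecting all colours into a temp list and comparing len(set(temp)) with len(temp) after the loop.
-- crash fix: A raises KeyError on configs whose first player lacking the 'couleur' key is preceded only by allowed colours but containing a duplicate; B returns False there because it detects the duplicate before reaching the missing key. — e.g. on validConfig([[("couleur", "Rouge")], [("couleur", "Rouge")], []]): A raises KeyError, B returns false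
import Mathlib
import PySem

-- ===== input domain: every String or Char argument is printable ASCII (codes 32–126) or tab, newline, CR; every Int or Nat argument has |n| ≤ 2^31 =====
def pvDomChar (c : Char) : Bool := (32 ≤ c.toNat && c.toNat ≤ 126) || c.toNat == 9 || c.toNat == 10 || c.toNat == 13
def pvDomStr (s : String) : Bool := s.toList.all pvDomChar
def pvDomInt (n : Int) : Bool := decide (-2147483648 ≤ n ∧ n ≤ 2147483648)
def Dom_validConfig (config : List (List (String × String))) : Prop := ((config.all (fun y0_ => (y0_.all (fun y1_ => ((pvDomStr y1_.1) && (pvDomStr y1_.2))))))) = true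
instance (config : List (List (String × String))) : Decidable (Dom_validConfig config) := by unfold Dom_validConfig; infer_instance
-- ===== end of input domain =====

-- B drops the set machinery: an index-based nested scan compares each colour with every
-- earlier player's colour, instead of A's collect-all-then-compare-set-size pass;
-- return values are proved equal on Pre_.

-- ===== PORT A =====
def pvAllowed : List String := ["Rouge", "Bleu", "Vert", "Jaune"]

-- the for-loop of A, carrying the temp list; player["couleur"] is total (getD) under Pre_
def validConfigLoop (config : List (List (String × String))) (temp : List String) : Bool :=
  match config with
  | [] => if (PySem.Set.ofList temp).length ≠ temp.length then false else true
  | p :: rest =>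
    let temp' := temp ++ [PySem.Dict.getD (PySem.Dict.mk p) "couleur" ""]
    if !(pvAllowed.contains (PySem.Dict.getD (PySem.Dict.mk p) "couleur" "")) then false
    else validConfigLoop rest temp'

def validConfig (config : List (List (String × String))) : Bool :=
  validConfigLoop config []

-- ===== PORT B =====
-- the colour of player i; config[j] for j < i is always in range, so getD is exact
def pvColAt (config : List (List (String × String))) (i : Nat) : String :=
  PySem.Dict.getD (PySem.Dict.mk (config.getD i [])) "couleur" ""

-- B's outer for-loop over indices i; the inner `for j in range(i)` is the `.any` over range i
def validConfigAltLoop (config : List (List (String × String))) (i : Nat) : Bool :=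
  if h : i < config.length then
    let c := pvColAt config i
    if !(pvAllowed.contains c) then false
    else if (List.range i).any (fun j => pvColAt config j == c) then false
    else validConfigAltLoop config (i + 1)
  else true
termination_by config.length - i

def validConfig_alt (config : List (List (String × String))) : Bool :=
  validConfigAltLoop config 0

-- ===== PRECONDITION & SPEC =====
-- Pre_ is exactly the inputs on which Python A returns: whenever a player dict lacks the
-- "couleur" key (A would raise KeyError there), some earlier player's colour is not allowed,
-- so A has already returned False before reaching it.
def Pre_validConfig (config : List (List (String × String))) : Prop :=
  ∀ i ∈ List.range config.length,
    (PySem.Dict.mk (config.getD i [])).contains "couleur" = false →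
    ∃ j ∈ List.range i,
      pvAllowed.contains ((PySem.Dict.mk (config.getD j [])).getD "couleur" "") = false
instance (config : List (List (String × String))) : Decidable (Pre_validConfig config) := by
  unfold Pre_validConfig; infer_instance

def pvWitness_validConfig : (List (List (String × String))) :=
  [[("couleur", "Rouge")], [("couleur", "Bleu")]]

-- A raises KeyError on configs whose first player without a "couleur" key is preceded only by
-- allowed colours but by at least one duplicate; B returns False there (the duplicate is seen first).
def Raises_validConfig (config : List (List (String × String))) : Prop :=
  ∃ i ∈ List.range config.length,
    (PySem.Dict.mk (config.getD i [])).contains "couleur" = false ∧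
    (∀ j ∈ List.range i,
      (PySem.Dict.mk (config.getD j [])).contains "couleur" = true ∧
      pvAllowed.contains ((PySem.Dict.mk (config.getD j [])).getD "couleur" "") = true) ∧
    ¬ ((config.take i).map (fun p => (PySem.Dict.mk p).getD "couleur" "")).Nodup
instance (config : List (List (String × String))) : Decidable (Raises_validConfig config) := by
  unfold Raises_validConfig; infer_instance

def pvRaiseWitness_validConfig : (List (List (String × String))) :=
  [[("couleur", "Rouge")], [("couleur", "Rouge")], []]
def pvRaiseWitnessOut_validConfig : Bool := false

def Spec_validConfig (config : List (List (String × String))) (out : Bool) : Prop := out = validConfig_alt config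
instance (config : List (List (String × String))) (out : Bool) : Decidable (Spec_validConfig config out) := by unfold Spec_validConfig; infer_instance

-- ===== CLAIM (what is proved, stated in full; the proofs are below) =====
def Claim_equal_validConfig : Prop := ∀ (config : List (List (String × String))), Dom_validConfig config → Pre_validConfig config → Spec_validConfig config (validConfig config)

def Claim_raises_validConfig : Prop := (∀ (config : List (List (String × String))), Dom_validConfig config → Raises_validConfig config → ¬ Pre_validConfig config) ∧ (Dom_validConfig (pvRaiseWitness_validConfig) ∧ Raises_validConfig (pvRaiseWitness_validConfig) ∧ validConfig_alt (pvRaiseWitness_validConfig) = pvRaiseWitnessOut_validConfig)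

-- ===== LEMMAS AND PROOFS =====

-- the common characterisation both loops are reduced to
def pvPhi (cfg : List (List (String × String))) (prev : List String) : Bool :=
  match cfg with
  | [] => true
  | p :: rest =>
    let c := PySem.Dict.getD (PySem.Dict.mk p) "couleur" ""
    if !(pvAllowed.contains c) then false
    else if prev.contains c then false
    else pvPhi rest (prev ++ [c])

-- len(set(xs)) = len(xs) exactly when xs has no duplicates
lemma len_ofList_eq_iff (xs : List String) :
    (PySem.Set.ofList xs).length = xs.length ↔ xs.Nodup := by
  induction xs using List.reverseRecOn with
  | nil => simp [PySem.Set.ofList_nil]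
  | append_singleton ys y ih =>
    rw [PySem.Set.ofList_append_singleton]
    unfold PySem.Set.add
    have hle := PySem.Set.length_ofList_le (α := String) ys
    by_cases hy : y ∈ ys
    · have : PySem.Set.contains (PySem.Set.ofList ys) y = true := by
        rw [PySem.Set.contains_iff, PySem.Set.mem_ofList]; exact hy
      simp only [this, if_true, List.length_append, List.length_singleton,
        List.nodup_append]
      constructor
      · intro h; omega
      · intro h
        exact absurd hy (by simpa using (h.2.2 y hy))
    · have : PySem.Set.contains (PySem.Set.ofList ys) y = false := by
        rw [Bool.eq_false_iff]
        intro hc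
        exact hy ((PySem.Set.mem_ofList _ _).1 ((PySem.Set.contains_iff _ _).1 hc))
      simp only [this, if_false, List.length_append, List.length_singleton,
        List.nodup_append, Bool.false_eq_true]
      constructor
      · intro h
        have := ih.1 (by omega)
        refine ⟨this, List.nodup_singleton y, ?_⟩
        intro a ha b hb; simp at hb; subst hb; intro hab; exact hy (hab ▸ ha)
      · rintro ⟨h1, -, h3⟩
        have := ih.2 h1
        omega

-- A's loop equals "temp nodup so far" AND the characterisation
lemma loopA_eq (cfg : List (List (String × String))) :
    ∀ temp : List String,
      validConfigLoop cfg temp = (temp.Nodup && pvPhi cfg temp) := by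
  induction cfg with
  | nil =>
    intro temp
    simp only [validConfigLoop, pvPhi, Bool.and_true]
    by_cases h : (PySem.Set.ofList temp).length = temp.length
    · simp [h, (len_ofList_eq_iff temp).1 h]
    · simp only [h, ne_eq, not_false_iff, if_true]
      have : ¬ temp.Nodup := fun hn => h ((len_ofList_eq_iff temp).2 hn)
      simp [this]
  | cons p rest ih =>
    intro temp
    simp only [validConfigLoop, pvPhi]
    set c := PySem.Dict.getD (PySem.Dict.mk p) "couleur" "" with hc
    by_cases hall : pvAllowed.contains c
    · simp only [hall, Bool.not_true, Bool.false_eq_true, if_false]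
      rw [ih]
      by_cases hmem : c ∈ temp
      · have h1 : ¬ (temp ++ [c]).Nodup := by
          intro h
          rcases List.nodup_append.1 h with ⟨-, -, hdisj⟩
          exact hdisj c hmem c (by simp) rfl
        have h2 : temp.contains c = true := by simpa using hmem
        have h1' : decide ((temp ++ [c]).Nodup) = false := decide_eq_false h1
        simp [h1', h2, hmem]
      · have h1 : (temp ++ [c]).Nodup ↔ temp.Nodup := by
          constructor
          · intro h; exact (List.nodup_append.1 h).1
          · intro h
            refine List.nodup_append.2 ⟨h, List.nodup_singleton c, ?_⟩
            intro a ha b hb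
            simp only [List.mem_singleton] at hb
            subst hb
            exact fun heq => hmem (heq ▸ ha)
        have h2 : temp.contains c = false := by simpa using hmem
        simp [h1, h2, hmem]
    · rw [Bool.not_eq_true] at hall
      simp only [hall, Bool.not_false, if_true, Bool.and_false]

-- the inner range-scan of B equals a contains check on the prefix colours
lemma range_any_eq_contains (config : List (List (String × String))) (i : Nat)
    (hi : i ≤ config.length) (c : String) :
    (List.range i).any (fun j => pvColAt config j == c)
      = ((config.take i).map (fun p => PySem.Dict.getD (PySem.Dict.mk p) "couleur" "")).contains c := by
  induction i with
  | zero => simp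
  | succ n ih =>
    have hn : n < config.length := by omega
    rw [List.range_succ, List.any_append, ih (by omega),
      List.take_succ, List.map_append]
    have : config[n]? = some (config[n]'hn) := List.getElem?_eq_getElem hn
    simp [List.any_eq, pvColAt, this, List.getD, BEq.comm]

-- B's loop equals the characterisation applied to the remaining players
lemma loopB_eq (config : List (List (String × String))) :
    ∀ i, i ≤ config.length →
      validConfigAltLoop config i
        = pvPhi (config.drop i)
            ((config.take i).map (fun p => PySem.Dict.getD (PySem.Dict.mk p) "couleur" "")) := by
  intro i hi
  induction hlt : config.length - i generalizing i with
  | zero =>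
    have : i = config.length := by omega
    subst this
    rw [validConfigAltLoop]
    simp [pvPhi]
  | succ n ih =>
    have hi' : i < config.length := by omega
    rw [validConfigAltLoop]
    simp only [hi', dif_pos]
    have hdrop : config.drop i = config[i]'hi' :: config.drop (i + 1) :=
      List.drop_eq_getElem_cons hi'
    have hcol : pvColAt config i
        = PySem.Dict.getD (PySem.Dict.mk (config[i]'hi')) "couleur" "" := by
      simp [pvColAt, List.getD, List.getElem?_eq_getElem hi']
    have htake : config.take (i + 1) = config.take i ++ [config[i]'hi'] :=
      List.take_succ_eq_append_getElem hi'
    rw [hdrop]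
    simp only [pvPhi, hcol, range_any_eq_contains config i (by omega)]
    by_cases hall : pvAllowed.contains (PySem.Dict.getD (PySem.Dict.mk (config[i]'hi')) "couleur" "")
    · simp only [hall, Bool.not_true, Bool.false_eq_true, if_false]
      by_cases hmem : ((config.take i).map (fun p => PySem.Dict.getD (PySem.Dict.mk p) "couleur" "")).contains (PySem.Dict.getD (PySem.Dict.mk (config[i]'hi')) "couleur" "")
      · simp only [hmem, if_true]
      · rw [Bool.not_eq_true] at hmem
        simp only [hmem, Bool.false_eq_true, if_false]
        rw [ih (i + 1) (by omega) (by omega), htake]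
        simp only [List.map_append, List.map_cons, List.map_nil]
    · rw [Bool.not_eq_true] at hall
      simp only [hall, Bool.not_false, if_true]

-- ===== VERDICT (by name: the statement is the Claim_ definition above) =====
theorem validConfig_spec : Claim_equal_validConfig := by
  intro config _ _
  unfold Spec_validConfig validConfig validConfig_alt
  rw [loopA_eq, loopB_eq config 0 (by omega)]
  simp

@[simp] theorem validConfig_raises : Claim_raises_validConfig := by
  unfold Claim_raises_validConfig
  have hB : validConfig_alt pvRaiseWitness_validConfig = pvRaiseWitnessOut_validConfig := by
    rw [validConfig_alt, loopB_eq _ 0 (by simp [pvRaiseWitness_validConfig])]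
    decide
  refine ⟨?_, by decide, by decide, hB⟩
  intro config _ hr hp
  obtain ⟨i, hi, hmiss, hall, -⟩ := hr
  obtain ⟨j, hj, hbad⟩ := hp i hi hmiss
  have := (hall j hj).2
  rw [this] at hbad
  exact absurd hbad (by decide)
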